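-- pv_equiv track=rewrite | github.com/S4yfullXD/super_intelligent_scanner | utils/report_generator.py | is_sensitive_path
-- ===== SOURCE A (Python) =====
-- def is_sensitive_path(path: str) -> bool:
--     """Enhanced sensitive path detection"""
--     sensitive_indicators = [
--         ".env",
--         "config",
--         "secret",
--         "password",
--         "key",
--         "token",
--         "admin",
--         "database",
--         "backup",
--         "log",
--         "credential",
--     ]
--     path_lower = path.lower()
--     return any(indicator in path_lower for indicator in sensitive_indicators)
-- ===== SOURCE B (Python) =====
-- _KW = (".env", "config", "secret", "password", "key", "token",
--        "admin", "database", "backup", "log", "credential")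
--
--
-- def _match_at(path, i, kw):
--     # case-insensitive keyword match at position i, char by char
--     for j, ch in enumerate(kw):
--         if i + j >= len(path) or path[i + j].lower() != ch:
--             return False
--     return True
--
--
-- def is_sensitive_path(path: str) -> bool:
--     for i in range(len(path)):
--         for kw in _KW:
--             if _match_at(path, i, kw):
--                 return True
--     return False
-- ===== Notes on version B (the rewrite author's own statement) =====
-- stated objective: alternative
-- what changed: Instead of lowercasing the whole path and running eleven independent substring-membership searches, B scans the path positions once and at each position matches each keyword character by character, lowercasing characters on the fly; it never materialises the lowercased string.
import Mathlib
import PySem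

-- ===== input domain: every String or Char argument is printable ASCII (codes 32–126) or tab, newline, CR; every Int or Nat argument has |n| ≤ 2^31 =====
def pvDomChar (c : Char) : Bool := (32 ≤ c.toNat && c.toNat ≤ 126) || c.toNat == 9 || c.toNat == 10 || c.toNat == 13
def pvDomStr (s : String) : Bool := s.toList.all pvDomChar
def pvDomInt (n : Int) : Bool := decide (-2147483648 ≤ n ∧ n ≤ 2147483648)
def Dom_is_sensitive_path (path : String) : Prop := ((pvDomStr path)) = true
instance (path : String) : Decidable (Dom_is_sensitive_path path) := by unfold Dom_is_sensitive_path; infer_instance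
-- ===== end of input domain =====

-- B scans path positions once, matching each keyword char-by-char with on-the-fly
-- case folding, instead of lowercasing the path and running eleven substring searches
-- (objective: alternative; same asymptotic cost).


-- ===== PORT A =====
-- A: any(indicator in path_lower for indicator in sensitive_indicators)
def is_sensitive_path (path : String) : Bool :=
  let sensitive_indicators : List String :=
    [".env", "config", "secret", "password", "key", "token",
     "admin", "database", "backup", "log", "credential"]
  let path_lower := PySem.Str.lower path
  sensitive_indicators.any (fun indicator => PySem.Str.isIn indicator path_lower)

-- ===== PORT B =====
-- B's keyword tuple
def pvKW : List (List Char) :=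
  [".env".toList, "config".toList, "secret".toList, "password".toList,
   "key".toList, "token".toList, "admin".toList, "database".toList,
   "backup".toList, "log".toList, "credential".toList]

-- _match_at: char-by-char case-insensitive match of kw against the suffix of the
-- path starting at the current position (the 'i + j >= len' bound is the [] case;
-- 'path[i+j].lower()' is lowerChar, exact on the ASCII domain)
def pvMatchAt : List Char → List Char → Bool
  | _, [] => true
  | [], _ :: _ => false
  | c :: cs, k :: ks => PySem.Chars.lowerChar c == k && pvMatchAt cs ks

-- the 'for i in range(len(path))' loop: walk the suffixes of the path left to right
def pvScan : List Char → Bool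
  | [] => false
  | c :: cs => pvKW.any (fun kw => pvMatchAt (c :: cs) kw) || pvScan cs

def is_sensitive_path_alt (path : String) : Bool :=
  pvScan path.toList

-- ===== PRECONDITION & SPEC =====
def Spec_is_sensitive_path (path : String) (out : Bool) : Prop := out = is_sensitive_path_alt path
instance (path : String) (out : Bool) : Decidable (Spec_is_sensitive_path path out) := by unfold Spec_is_sensitive_path; infer_instance

-- ===== CLAIM =====
def Claim_equal_is_sensitive_path : Prop := ∀ (path : String), Dom_is_sensitive_path path → Spec_is_sensitive_path path (is_sensitive_path path)

-- ===== LEMMAS AND PROOFS =====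

-- the char-by-char case-folding match is 'kw is a prefix of the lowercased suffix'
theorem pvMatchAt_iff (cs ks : List Char) :
    pvMatchAt cs ks = true ↔ ks <+: PySem.Chars.lower cs := by
  induction cs generalizing ks with
  | nil =>
    cases ks with
    | nil => simp [pvMatchAt, PySem.Chars.lower]
    | cons k ks => simp [pvMatchAt, PySem.Chars.lower]
  | cons c cs ih =>
    cases ks with
    | nil => simp [pvMatchAt]
    | cons k ks =>
      rw [show PySem.Chars.lower (c :: cs) = PySem.Chars.lowerChar c :: PySem.Chars.lower cs from rfl]
      rw [List.cons_prefix_cons]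
      simp only [pvMatchAt, Bool.and_eq_true, beq_iff_eq, ih]
      constructor <;> rintro ⟨h1, h2⟩ <;> exact ⟨h1.symm, h2⟩

-- the positional scan finds exactly the keywords occurring as infixes of the
-- lowercased path (all keywords are nonempty, so the end position is irrelevant)
theorem pvScan_iff (cs : List Char) :
    pvScan cs = true ↔ ∃ kw ∈ pvKW, kw <:+: PySem.Chars.lower cs := by
  induction cs with
  | nil =>
    simp only [pvScan, Bool.false_eq_true, false_iff]
    rintro ⟨kw, hkw, hinf⟩
    rw [show PySem.Chars.lower [] = [] from rfl, List.infix_nil] at hinf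
    subst hinf
    revert hkw; decide
  | cons c cs ih =>
    simp only [pvScan, Bool.or_eq_true, List.any_eq_true, pvMatchAt_iff, ih]
    constructor
    · rintro (⟨kw, hkw, hpre⟩ | ⟨kw, hkw, hinf⟩)
      · exact ⟨kw, hkw, hpre.isInfix⟩
      · refine ⟨kw, hkw, ?_⟩
        rw [show PySem.Chars.lower (c :: cs) = PySem.Chars.lowerChar c :: PySem.Chars.lower cs from rfl]
        exact List.infix_cons hinf
    · rintro ⟨kw, hkw, hinf⟩
      rw [show PySem.Chars.lower (c :: cs) = PySem.Chars.lowerChar c :: PySem.Chars.lower cs from rfl] at hinf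
      rcases List.infix_cons_iff.mp hinf with hpre | hinf'
      · exact Or.inl ⟨kw, hkw, hpre⟩
      · exact Or.inr ⟨kw, hkw, hinf'⟩

-- ===== VERDICT =====
theorem is_sensitive_path_spec : Claim_equal_is_sensitive_path := by
  intro path _
  unfold Spec_is_sensitive_path is_sensitive_path is_sensitive_path_alt
  dsimp only
  rw [Bool.eq_iff_iff]
  rw [pvScan_iff]
  simp only [List.any_eq_true, PySem.Str.isIn_iff_infix, PySem.Str.toList_lower]
  constructor
  · rintro ⟨s, hs, hinf⟩
    fin_cases hs <;> exact ⟨_, by decide, hinf⟩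
  · rintro ⟨kw, hkw, hinf⟩
    fin_cases hkw <;> exact ⟨_, by decide, hinf⟩
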